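-- pv_equiv track=rewrite | github.com/HackerDom/qctf-school-2018 | tasks/g-codes/contour_utils.py | horizontally_space_contoursets
-- ===== SOURCE A (Python) =====
-- def shift_point(point, dx, dy):
--     return point[0] + dx, point[1] + dy
--
-- def shift_contour(contour, dx, dy):
--     return [shift_point(point, dx, dy) for point in contour]
--
-- def shift_contours(contours, dx, dy):
--     return [shift_contour(contour, dx, dy) for contour in contours]
--
-- def iterate_all_points(contours):
--     for contour in contours:
--         for point in contour:
--             yield point
--
-- def horizontally_space_contoursets(contoursets, spacing):
--     all_contours = []
--     current_shift = 0
--     for contours in contoursets: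
--         shifted_contours = shift_contours(contours, current_shift, 0)
--         all_contours.extend(shifted_contours)
--         max_x = max(point[0] for point in iterate_all_points(shifted_contours))
--         current_shift = max_x + spacing
--     return all_contours
-- ===== SOURCE B (Python) =====
-- def horizontally_space_contoursets(contoursets, spacing):
--     # Recursive placement: the first contourset stays where it is; the rest are
--     # spaced recursively (as if starting at 0) and then the whole tail block is
--     # shifted right by the head's max x plus spacing.
--     if not contoursets:
--         return []
--     head, rest = contoursets[0], contoursets[1:]
--     off = max(x for contour in head for x, _ in contour) + spacing
--     tail = [[(x + off, y) for x, y in contour]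
--             for contour in horizontally_space_contoursets(rest, spacing)]
--     return [[(x, y) for x, y in contour] for contour in head] + tail
-- ===== Notes on version B (the rewrite author's own statement) =====
-- stated objective: alternative
-- what changed: Replaces A's single forward pass with a running offset by structural recursion: the head contourset is kept in place and the entire recursively-spaced tail block is shifted right by the head's max x plus spacing, so points accumulate their offset through repeated tail shifts instead of one precomputed shift.
import Mathlib
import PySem

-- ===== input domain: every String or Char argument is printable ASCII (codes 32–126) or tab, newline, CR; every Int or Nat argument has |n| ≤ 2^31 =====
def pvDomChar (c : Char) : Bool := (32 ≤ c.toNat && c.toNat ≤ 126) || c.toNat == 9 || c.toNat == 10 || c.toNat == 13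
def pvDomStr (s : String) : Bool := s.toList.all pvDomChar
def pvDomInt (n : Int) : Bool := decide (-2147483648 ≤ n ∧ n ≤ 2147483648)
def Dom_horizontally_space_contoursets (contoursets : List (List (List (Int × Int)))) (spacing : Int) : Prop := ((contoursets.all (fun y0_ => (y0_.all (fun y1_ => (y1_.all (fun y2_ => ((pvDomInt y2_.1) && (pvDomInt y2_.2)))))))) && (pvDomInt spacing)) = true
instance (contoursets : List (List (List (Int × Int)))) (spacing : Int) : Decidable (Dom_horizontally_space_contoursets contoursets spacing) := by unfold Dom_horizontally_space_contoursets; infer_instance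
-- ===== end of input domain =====

-- B replaces A's single forward pass with a running offset by structural recursion:
-- head stays in place, the recursively-spaced tail block is shifted by head's max x + spacing
-- (alternative decomposition; not faster — tail points are shifted repeatedly).

-- ===== PORT A =====
def shiftPoint (point : Int × Int) (dx dy : Int) : Int × Int := (point.1 + dx, point.2 + dy)

def shiftContour (contour : List (Int × Int)) (dx dy : Int) : List (Int × Int) :=
  contour.map (fun point => shiftPoint point dx dy)

def shiftContours (contours : List (List (Int × Int))) (dx dy : Int) : List (List (Int × Int)) :=
  contours.map (fun contour => shiftContour contour dx dy)

-- Python 'max' raises ValueError on an empty iterable; Pre_ excludes that, .getD 0 is never read on Pre_.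
def horizontally_space_contoursets (contoursets : List (List (List (Int × Int)))) (spacing : Int) : List (List (Int × Int)) :=
  (contoursets.foldl
    (fun (st : List (List (Int × Int)) × Int) contours =>
      let shifted_contours := shiftContours contours st.2 0
      let all_contours := st.1 ++ shifted_contours
      let max_x := (((shifted_contours.flatMap id).map Prod.fst).max?).getD 0
      (all_contours, max_x + spacing))
    ([], 0)).1

-- ===== PORT B =====
def horizontally_space_contoursets_alt (contoursets : List (List (List (Int × Int)))) (spacing : Int) : List (List (Int × Int)) :=
  match contoursets with
  | [] => []
  | head :: rest =>
      let off := (((head.flatMap id).map Prod.fst).max?).getD 0 + spacing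
      let tail := (horizontally_space_contoursets_alt rest spacing).map
        (fun contour => contour.map (fun p => (p.1 + off, p.2)))
      head.map (fun contour => contour.map (fun p => (p.1, p.2))) ++ tail

-- ===== PRECONDITION & SPEC =====
-- Pre_ excludes contoursets containing a set with no points: Python A (and B) raise ValueError there (max of empty iterable).
def Pre_horizontally_space_contoursets (contoursets : List (List (List (Int × Int)))) (spacing : Int) : Prop :=
  ∀ cs ∈ contoursets, cs.flatMap id ≠ []
instance (contoursets : List (List (List (Int × Int)))) (spacing : Int) : Decidable (Pre_horizontally_space_contoursets contoursets spacing) := by unfold Pre_horizontally_space_contoursets; infer_instance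

def pvWitness_horizontally_space_contoursets : (List (List (List (Int × Int)))) × Int :=
  ([[[(0, 1), (2, 3)]], [[(1, 0)], [(4, 5)]]], 3)

def Spec_horizontally_space_contoursets (contoursets : List (List (List (Int × Int)))) (spacing : Int) (out : List (List (Int × Int))) : Prop := out = horizontally_space_contoursets_alt contoursets spacing
instance (contoursets : List (List (List (Int × Int)))) (spacing : Int) (out : List (List (Int × Int))) : Decidable (Spec_horizontally_space_contoursets contoursets spacing out) := by unfold Spec_horizontally_space_contoursets; infer_instance

-- ===== CLAIM (what is proved, stated in full; the proofs are below) =====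
def Claim_equal_horizontally_space_contoursets : Prop := ∀ (contoursets : List (List (List (Int × Int)))) (spacing : Int), Dom_horizontally_space_contoursets contoursets spacing → Pre_horizontally_space_contoursets contoursets spacing → Spec_horizontally_space_contoursets contoursets spacing (horizontally_space_contoursets contoursets spacing)

-- ===== LEMMAS AND PROOFS =====

-- A's result, unrolled as a recursion carrying the accumulated shift s
def goSpec (contoursets : List (List (List (Int × Int)))) (spacing s : Int) : List (List (Int × Int)) :=
  match contoursets with
  | [] => []
  | cs :: rest =>
      cs.map (fun c => c.map (fun p => (p.1 + s, p.2))) ++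
      goSpec rest spacing (((((cs.flatMap id)).map Prod.fst).max?).getD 0 + s + spacing)

def shiftAll (l : List (List (Int × Int))) (s : Int) : List (List (Int × Int)) :=
  l.map (fun c => c.map (fun p => (p.1 + s, p.2)))

theorem foldl_max_add (t : List Int) (x c : Int) :
    (t.map (fun a => a + c)).foldl max (x + c) = t.foldl max x + c := by
  induction t generalizing x with
  | nil => rfl
  | cons h tl ih =>
      simp only [List.map_cons, List.foldl_cons]
      rw [show max (x + c) (h + c) = max x h + c from max_add_add_right x h c, ih]

theorem max?_getD_add (xs : List Int) (c : Int) (h : xs ≠ []) :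
    ((xs.map (fun a => a + c)).max?).getD 0 = (xs.max?).getD 0 + c := by
  cases xs with
  | nil => exact absurd rfl h
  | cons x t =>
      simp only [List.map_cons, List.max?_cons', Option.getD_some]
      exact foldl_max_add t x c

theorem shifted_flat (cs : List (List (Int × Int))) (s : Int) :
    ((shiftContours cs s 0).flatMap id).map Prod.fst
      = ((cs.flatMap id).map Prod.fst).map (fun a => a + s) := by
  simp only [shiftContours, shiftContour, shiftPoint]
  induction cs with
  | nil => rfl
  | cons c rest ih => simp_all [List.flatMap_cons]

theorem shiftContours_zero (cs : List (List (Int × Int))) (s : Int) :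
    shiftContours cs s 0 = cs.map (fun c => c.map (fun p => (p.1 + s, p.2))) := by
  simp [shiftContours, shiftContour, shiftPoint]

theorem A_go (spacing : Int) (rest : List (List (List (Int × Int))))
    (acc : List (List (Int × Int))) (s : Int)
    (h : ∀ cs ∈ rest, cs.flatMap id ≠ []) :
    (rest.foldl
      (fun (st : List (List (Int × Int)) × Int) contours =>
        let shifted_contours := shiftContours contours st.2 0
        let all_contours := st.1 ++ shifted_contours
        let max_x := (((shifted_contours.flatMap id).map Prod.fst).max?).getD 0
        (all_contours, max_x + spacing))
      (acc, s)).1 = acc ++ goSpec rest spacing s := by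
  induction rest generalizing acc s with
  | nil => simp [goSpec]
  | cons cs rest ih =>
      have hcs : cs.flatMap id ≠ [] := h cs (List.mem_cons_self ..)
      have hne : (cs.flatMap id).map Prod.fst ≠ [] := by
        simpa using hcs
      simp only [List.foldl_cons]
      rw [ih _ _ (fun c hc => h c (List.mem_cons_of_mem _ hc))]
      rw [goSpec, shifted_flat, max?_getD_add _ _ hne, shiftContours_zero]
      rw [List.append_assoc]

-- B's result shifted by s is A's unrolled recursion started at s
theorem B_go (spacing : Int) (css : List (List (List (Int × Int)))) (s : Int) :
    shiftAll (horizontally_space_contoursets_alt css spacing) s = goSpec css spacing s := by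
  induction css generalizing s with
  | nil => simp [horizontally_space_contoursets_alt, goSpec, shiftAll]
  | cons cs rest ih =>
      rw [horizontally_space_contoursets_alt, goSpec]
      simp only [shiftAll, List.map_append, List.map_map]
      congr 1
      · simp [Function.comp]
      · rw [show (((cs.flatMap id).map Prod.fst).max?).getD 0 + s + spacing
             = (((cs.flatMap id).map Prod.fst).max?).getD 0 + spacing + s by ring]
        rw [← ih ((((cs.flatMap id).map Prod.fst).max?).getD 0 + spacing + s)]
        simp [shiftAll, Function.comp, add_assoc]

-- ===== VERDICT (by name: the statement is the Claim_ definition above) =====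
theorem horizontally_space_contoursets_spec : Claim_equal_horizontally_space_contoursets := by
  intro contoursets spacing _ hpre
  unfold Spec_horizontally_space_contoursets
  unfold horizontally_space_contoursets
  rw [A_go spacing contoursets [] 0 hpre]
  rw [← B_go spacing contoursets 0]
  simp [shiftAll]
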